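-- pv_equiv track=rewrite | github.com/rompasaurus/dilder | hardware-design/Board Design kicad/autorouter.py | path_to_segments
-- ===== SOURCE A (Python) =====
-- def path_to_segments(path):
--     """Convert a list of (layer, gx, gy) waypoints to track segments and vias."""
--     if not path or len(path) < 2:
--         return [], []
--
--     segments = []  # (layer, gx1, gy1, gx2, gy2)
--     vias = []      # (gx, gy)
--
--     seg_start = path[0]
--     for i in range(1, len(path)):
--         prev = path[i-1]
--         curr = path[i]
--
--         if prev[0] != curr[0]:
--             # Layer change — emit current segment and via
--             if seg_start != prev:
--                 segments.append((seg_start[0], seg_start[1], seg_start[2], prev[1], prev[2]))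
--             vias.append((prev[1], prev[2]))
--             seg_start = curr
--         elif (curr[1] - prev[1], curr[2] - prev[2]) != \
--              (prev[1] - path[i-2][1] if i >= 2 and prev[0] == path[i-2][0] else 999,
--               prev[2] - path[i-2][2] if i >= 2 and prev[0] == path[i-2][0] else 999):
--             # Direction changed — emit segment, start new one
--             if seg_start[1] != prev[1] or seg_start[2] != prev[2]:
--                 segments.append((seg_start[0], seg_start[1], seg_start[2], prev[1], prev[2]))
--             seg_start = prev
--
--     # Final segment
--     last = path[-1]
--     if seg_start[1] != last[1] or seg_start[2] != last[2]:
--         segments.append((seg_start[0], seg_start[1], seg_start[2], last[1], last[2]))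
--
--     return segments, vias
-- ===== SOURCE B (Python) =====
-- def path_to_segments(path):
--     """Convert a list of (layer, gx, gy) waypoints to track segments and vias."""
--     if not path or len(path) < 2:
--         return [], []
--
--     # Phase 1: split the path into maximal runs of consecutive same-layer waypoints.
--     runs = []
--     cur = [path[0]]
--     for p in path[1:]:
--         if p[0] == cur[-1][0]:
--             cur.append(p)
--         else:
--             runs.append(cur)
--             cur = [p]
--     runs.append(cur)
--
--     # A via sits at the last waypoint of every run except the final one.
--     vias = [(run[-1][1], run[-1][2]) for run in runs[:-1]]
--
--     # Phase 2: within each run, fold consecutive equal deltas into maximal segments.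
--     segments = []
--     for run in runs:
--         anchor = run[0]
--         for j in range(2, len(run)):
--             d = (run[j][1] - run[j-1][1], run[j][2] - run[j-1][2])
--             pd = (run[j-1][1] - run[j-2][1], run[j-1][2] - run[j-2][2])
--             if d != pd:
--                 if anchor[1] != run[j-1][1] or anchor[2] != run[j-1][2]:
--                     segments.append((anchor[0], anchor[1], anchor[2], run[j-1][1], run[j-1][2]))
--                 anchor = run[j-1]
--         last = run[-1]
--         if anchor[1] != last[1] or anchor[2] != last[2]:
--             segments.append((anchor[0], anchor[1], anchor[2], last[1], last[2]))
--     return segments, vias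
-- ===== Notes on version B (the rewrite author's own statement) =====
-- stated objective: alternative
-- what changed: Replaces A's single index loop with interleaved sentinel-delta bookkeeping by an explicit two-phase decomposition: first group the path into maximal same-layer runs (vias = run boundaries), then fold equal consecutive deltas within each run into maximal segments.
import Mathlib
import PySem

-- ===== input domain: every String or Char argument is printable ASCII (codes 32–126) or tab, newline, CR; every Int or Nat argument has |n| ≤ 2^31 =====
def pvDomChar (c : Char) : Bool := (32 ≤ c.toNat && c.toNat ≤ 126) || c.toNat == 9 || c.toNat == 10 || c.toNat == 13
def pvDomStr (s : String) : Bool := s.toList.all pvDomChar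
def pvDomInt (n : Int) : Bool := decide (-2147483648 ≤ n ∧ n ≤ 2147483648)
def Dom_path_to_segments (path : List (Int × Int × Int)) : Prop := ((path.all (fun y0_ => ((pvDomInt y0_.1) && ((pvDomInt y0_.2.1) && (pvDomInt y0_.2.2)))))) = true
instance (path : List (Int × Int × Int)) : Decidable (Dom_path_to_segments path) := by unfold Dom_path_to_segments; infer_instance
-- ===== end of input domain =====

-- B re-decomposes A's single loop into two phases (same-layer runs, then per-run delta folding); equal output, same O(n) cost ("alternative").

-- ===== PORT A =====
-- A's previous-delta expression: `prev - path[i-2]` if i >= 2 and same layer, else the (999, 999) sentinel;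
-- `pp` carries path[i-2] (none when i < 2)
def pvPdOf (pp : Option (Int × Int × Int)) (prev : Int × Int × Int) : Int × Int :=
  match pp with
  | some q => if prev.1 = q.1 then (prev.2.1 - q.2.1, prev.2.2 - q.2.2) else (999, 999)
  | none => (999, 999)

-- A's loop `for i in range(1, len(path))`: state (segments, vias, seg_start); `pp`/`prev`/`rest` carry
-- path[i-2], path[i-1] and path[i:]; the [] case is the final-segment code after the loop (prev = path[-1])
def pvGoA (segs : List (Int × Int × Int × Int × Int)) (vias : List (Int × Int))
    (anchor : Int × Int × Int) (pp : Option (Int × Int × Int)) (prev : Int × Int × Int) :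
    List (Int × Int × Int) → (List (Int × Int × Int × Int × Int)) × (List (Int × Int))
  | [] =>
      (if anchor.2.1 ≠ prev.2.1 ∨ anchor.2.2 ≠ prev.2.2 then segs ++ [(anchor.1, anchor.2.1, anchor.2.2, prev.2.1, prev.2.2)] else segs,
       vias)
  | curr :: rest' =>
      if prev.1 ≠ curr.1 then
        pvGoA (if anchor ≠ prev then segs ++ [(anchor.1, anchor.2.1, anchor.2.2, prev.2.1, prev.2.2)] else segs)
          (vias ++ [(prev.2.1, prev.2.2)]) curr (some prev) curr rest'
      else if (curr.2.1 - prev.2.1, curr.2.2 - prev.2.2) ≠ pvPdOf pp prev then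
        pvGoA (if anchor.2.1 ≠ prev.2.1 ∨ anchor.2.2 ≠ prev.2.2 then segs ++ [(anchor.1, anchor.2.1, anchor.2.2, prev.2.1, prev.2.2)] else segs)
          vias prev (some prev) curr rest'
      else
        pvGoA segs vias anchor (some prev) curr rest'

def path_to_segments (path : List (Int × Int × Int)) : (List (Int × Int × Int × Int × Int)) × (List (Int × Int)) :=
  match path with
  | [] => ([], [])
  | [_] => ([], [])
  | p0 :: p1 :: rest => pvGoA [] [] p0 none p0 (p1 :: rest)

-- ===== PORT B =====
-- phase 1 grouping step: append p to the current run if it shares its last point's layer, else close the run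
-- (cur is never empty, so the getLastD default is never used)
def pvGroupStep (s : (List (List (Int × Int × Int))) × List (Int × Int × Int)) (p : Int × Int × Int) :
    (List (List (Int × Int × Int))) × List (Int × Int × Int) :=
  if p.1 = (s.2.getLastD p).1 then (s.1, s.2 ++ [p]) else (s.1 ++ [s.2], [p])

-- `(run[-1][1], run[-1][2])` (runs are nonempty, default unused)
def pvLastCoords (run : List (Int × Int × Int)) : Int × Int :=
  ((run.getLastD (0, 0, 0)).2.1, (run.getLastD (0, 0, 0)).2.2)

-- phase 2 inner loop `for j in range(2, len(run))`: `pp`/`prev`/`rest` carry run[j-2], run[j-1], run[j:];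
-- the [] case is the run-final segment (prev = run[-1])
def pvRunSegs (segs : List (Int × Int × Int × Int × Int)) (anchor pp prev : Int × Int × Int) :
    List (Int × Int × Int) → List (Int × Int × Int × Int × Int)
  | [] => if anchor.2.1 ≠ prev.2.1 ∨ anchor.2.2 ≠ prev.2.2 then segs ++ [(anchor.1, anchor.2.1, anchor.2.2, prev.2.1, prev.2.2)] else segs
  | curr :: rest' =>
      if (curr.2.1 - prev.2.1, curr.2.2 - prev.2.2) ≠ (prev.2.1 - pp.2.1, prev.2.2 - pp.2.2) then
        pvRunSegs (if anchor.2.1 ≠ prev.2.1 ∨ anchor.2.2 ≠ prev.2.2 then segs ++ [(anchor.1, anchor.2.1, anchor.2.2, prev.2.1, prev.2.2)] else segs)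
          prev prev curr rest'
      else pvRunSegs segs anchor prev curr rest'

-- one iteration of `for run in runs` (runs are nonempty; a run shorter than 2 points yields no segment)
def pvSegRunStep (segs : List (Int × Int × Int × Int × Int)) (run : List (Int × Int × Int)) :
    List (Int × Int × Int × Int × Int) :=
  match run with
  | a :: b :: r => pvRunSegs segs a a b r
  | _ => segs

def path_to_segments_alt (path : List (Int × Int × Int)) : (List (Int × Int × Int × Int × Int)) × (List (Int × Int)) :=
  if path.length < 2 then ([], [])
  else
    match path with
    | p0 :: rest =>
        let s := rest.foldl pvGroupStep ([], [p0])
        let runs := s.1 ++ [s.2]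
        let vias := runs.dropLast.map pvLastCoords
        let segments := runs.foldl pvSegRunStep []
        (segments, vias)
    | [] => ([], [])

-- ===== PRECONDITION & SPEC =====
def Spec_path_to_segments (path : List (Int × Int × Int)) (out : (List (Int × Int × Int × Int × Int)) × (List (Int × Int))) : Prop := out = path_to_segments_alt path
instance (path : List (Int × Int × Int)) (out : (List (Int × Int × Int × Int × Int)) × (List (Int × Int))) : Decidable (Spec_path_to_segments path out) := by unfold Spec_path_to_segments; infer_instance

-- ===== CLAIM (what is proved, stated in full; the proofs are below) =====
def Claim_equal_path_to_segments : Prop := ∀ (path : List (Int × Int × Int)), Dom_path_to_segments path → Spec_path_to_segments path (path_to_segments path)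

-- ===== LEMMAS AND PROOFS =====

-- specification form of phase 1: (rest of the current run seeded by L, remaining runs)
def pvGrp (L : Int × Int × Int) : List (Int × Int × Int) → List (Int × Int × Int) × List (List (Int × Int × Int))
  | [] => ([], [])
  | p :: xs =>
      if p.1 = L.1 then (p :: (pvGrp p xs).1, (pvGrp p xs).2)
      else ([], (p :: (pvGrp p xs).1) :: (pvGrp p xs).2)

theorem pvGetLastD_irrel {α : Type} (l : List α) (a d d' : α) :
    (a :: l).getLastD d = (a :: l).getLastD d' := by
  cases h : (a :: l).getLast? with
  | none => simp at h
  | some x => simp [List.getLastD_eq_getLast?, h]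

theorem pvGetLastD_mem {α : Type} (l : List α) (a d : α) : (a :: l).getLastD d ∈ a :: l :=
  List.mem_of_getLast? rfl

-- B's foldl grouping computes pvGrp
theorem pvFold_grp : ∀ (xs : List (Int × Int × Int)) (acc : List (List (Int × Int × Int)))
    (pre : List (Int × Int × Int)) (L : Int × Int × Int),
    (xs.foldl pvGroupStep (acc, pre ++ [L])).1 ++ [(xs.foldl pvGroupStep (acc, pre ++ [L])).2] =
      acc ++ (pre ++ L :: (pvGrp L xs).1) :: (pvGrp L xs).2 := by
  intro xs
  induction xs with
  | nil => intro acc pre L; simp [pvGrp]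
  | cons p xs ih =>
      intro acc pre L
      by_cases h : p.1 = L.1
      · have hstep : pvGroupStep (acc, pre ++ [L]) p = (acc, (pre ++ [L]) ++ [p]) := by
          simp [pvGroupStep, h]
        simp only [List.foldl_cons, hstep]
        rw [ih acc (pre ++ [L]) p]
        simp [pvGrp, h]
      · have hstep : pvGroupStep (acc, pre ++ [L]) p = (acc ++ [pre ++ [L]], [p]) := by
          simp [pvGroupStep, h]
        simp only [List.foldl_cons, hstep]
        have h2 := ih (acc ++ [pre ++ [L]]) [] p
        simp only [List.nil_append] at h2
        rw [h2]
        simp [pvGrp, h]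

-- structure of pvGrp: its first component is a same-layer prefix of xs; its second component, when
-- nonempty, starts right after that prefix at a layer change
theorem pvGrp_decomp : ∀ (xs : List (Int × Int × Int)) (L : Int × Int × Int),
    (∀ x ∈ (pvGrp L xs).1, x.1 = L.1) ∧
    (((pvGrp L xs).2 = [] ∧ xs = (pvGrp L xs).1) ∨
      ∃ t0 t', xs = (pvGrp L xs).1 ++ t0 :: t' ∧ t0.1 ≠ L.1 ∧
        (pvGrp L xs).2 = (t0 :: (pvGrp t0 t').1) :: (pvGrp t0 t').2) := by
  intro xs
  induction xs with
  | nil => intro L; exact ⟨by simp [pvGrp], Or.inl ⟨rfl, rfl⟩⟩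
  | cons p xs ih =>
      intro L
      obtain ⟨hmem, hdec⟩ := ih p
      by_cases h : p.1 = L.1
      · have hg : pvGrp L (p :: xs) = (p :: (pvGrp p xs).1, (pvGrp p xs).2) := by
          simp [pvGrp, h]
        rw [hg]
        refine ⟨?_, ?_⟩
        · intro x hx
          rcases List.mem_cons.mp hx with h1 | h1
          · rw [h1, h]
          · exact (hmem x h1).trans h
        · rcases hdec with ⟨h2, hxs⟩ | ⟨t0, t', hxs, ht0, h2⟩
          · exact Or.inl ⟨h2, by rw [← hxs]⟩
          · exact Or.inr ⟨t0, t', by rw [List.cons_append, ← hxs],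
              fun hh => ht0 (hh.trans h.symm), h2⟩
      · have hg : pvGrp L (p :: xs) = ([], (p :: (pvGrp p xs).1) :: (pvGrp p xs).2) := by
          simp [pvGrp, h]
        rw [hg]
        exact ⟨by simp, Or.inr ⟨p, xs, rfl, h, rfl⟩⟩

-- for same-layer points, A's full-tuple comparison `seg_start != prev` is the coordinate comparison
theorem pvNe_coords (a p : Int × Int × Int) (h : a.1 = p.1) :
    (a ≠ p) = (a.2.1 ≠ p.2.1 ∨ a.2.2 ≠ p.2.2) := by
  obtain ⟨a1, a2, a3⟩ := a
  obtain ⟨p1, p2, p3⟩ := p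
  simp at h
  subst h
  simp [Prod.ext_iff]
  tauto

-- inside a run ending the path, A's loop computes B's per-run fold
theorem pvGoA_run_end : ∀ (f : List (Int × Int × Int)) segs vias (anchor q prev : Int × Int × Int),
    prev.1 = q.1 → anchor.1 = prev.1 → (∀ x ∈ f, x.1 = prev.1) →
    pvGoA segs vias anchor (some q) prev f = (pvRunSegs segs anchor q prev f, vias) := by
  intro f
  induction f with
  | nil => intro segs vias anchor q prev _ _ _; simp [pvGoA, pvRunSegs]
  | cons x f' ih =>
      intro segs vias anchor q prev hq ha hf
      have hx : x.1 = prev.1 := hf x (by simp)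
      have hne : ¬ prev.1 ≠ x.1 := by simp [hx]
      have hf' : ∀ y ∈ f', y.1 = x.1 :=
        fun y hy => (hf y (List.mem_cons_of_mem x hy)).trans hx.symm
      simp only [pvGoA, pvRunSegs, if_neg hne, pvPdOf, if_pos hq]
      by_cases hd : (x.2.1 - prev.2.1, x.2.2 - prev.2.2) = (prev.2.1 - q.2.1, prev.2.2 - q.2.2)
      · rw [if_neg (not_not_intro hd), if_neg (not_not_intro hd)]
        exact ih segs vias anchor prev x hx (ha.trans hx.symm) hf'
      · rw [if_pos hd, if_pos hd]
        exact ih _ vias prev prev x hx hx.symm hf'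

-- inside a run that ends at a layer change, A's loop computes B's per-run fold, records the via,
-- and restarts at the first point of the next run
theorem pvGoA_run_cont : ∀ (f : List (Int × Int × Int)) (t0 : Int × Int × Int)
    (t' : List (Int × Int × Int)) segs vias (anchor q prev : Int × Int × Int),
    prev.1 = q.1 → anchor.1 = prev.1 → (∀ x ∈ f, x.1 = prev.1) → t0.1 ≠ prev.1 →
    pvGoA segs vias anchor (some q) prev (f ++ t0 :: t') =
      pvGoA (pvRunSegs segs anchor q prev f)
        (vias ++ [(((prev :: f).getLastD (0, 0, 0)).2.1, ((prev :: f).getLastD (0, 0, 0)).2.2)])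
        t0 (some ((prev :: f).getLastD (0, 0, 0))) t0 t' := by
  intro f
  induction f with
  | nil =>
      intro t0 t' segs vias anchor q prev _ ha _ ht
      have hne : prev.1 ≠ t0.1 := fun hh => ht hh.symm
      simp only [List.nil_append, pvGoA, if_pos hne, pvRunSegs]
      simp [pvNe_coords anchor prev ha]
  | cons x f' ih =>
      intro t0 t' segs vias anchor q prev hq ha hf ht
      have hx : x.1 = prev.1 := hf x (by simp)
      have hne : ¬ prev.1 ≠ x.1 := by simp [hx]
      have hf' : ∀ y ∈ f', y.1 = x.1 :=
        fun y hy => (hf y (List.mem_cons_of_mem x hy)).trans hx.symm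
      have ht' : t0.1 ≠ x.1 := fun hh => ht (hh.trans hx)
      have hlast : ((prev :: x :: f').getLastD ((0 : Int), (0 : Int), (0 : Int))) =
          ((x :: f').getLastD (0, 0, 0)) := by
        rw [List.getLastD_cons]
        exact pvGetLastD_irrel f' x prev (0, 0, 0)
      simp only [List.cons_append, pvGoA, pvRunSegs, if_neg hne, pvPdOf, if_pos hq, hlast]
      by_cases hd : (x.2.1 - prev.2.1, x.2.2 - prev.2.2) = (prev.2.1 - q.2.1, prev.2.2 - q.2.2)
      · rw [if_neg (not_not_intro hd), if_neg (not_not_intro hd)]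
        exact ih t0 t' segs vias anchor prev x hx (ha.trans hx.symm) hf' ht'
      · rw [if_pos hd, if_pos hd]
        exact ih t0 t' _ vias prev prev x hx hx.symm hf' ht'

-- every point of a run built by pvGrp shares the seed's layer, so its last point does too
theorem pvGrp_last_layer (L : Int × Int × Int) (xs : List (Int × Int × Int)) :
    ((L :: (pvGrp L xs).1).getLastD (0, 0, 0)).1 = L.1 := by
  have hmem := pvGetLastD_mem (pvGrp L xs).1 L ((0, 0, 0) : Int × Int × Int)
  rcases List.mem_cons.mp hmem with h | h
  · rw [h]
  · exact (pvGrp_decomp xs L).1 _ h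

-- main loop correspondence: from any run-start state, A's loop equals B's run-by-run pipeline
theorem pvGoA_grp : ∀ (n : Nat) (rest : List (Int × Int × Int)), rest.length ≤ n →
    ∀ segs vias (prev : Int × Int × Int) (pp : Option (Int × Int × Int)),
    (∀ q, pp = some q → q.1 ≠ prev.1) →
    pvGoA segs vias prev pp prev rest =
      (((prev :: (pvGrp prev rest).1) :: (pvGrp prev rest).2).foldl pvSegRunStep segs,
       vias ++ (((prev :: (pvGrp prev rest).1) :: (pvGrp prev rest).2).dropLast).map pvLastCoords) := by
  intro n
  induction n with
  | zero =>
      intro rest hlen segs vias prev pp _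
      match rest with
      | [] => simp [pvGoA, pvGrp, pvSegRunStep]
      | c :: rest' => simp at hlen
  | succ n ih =>
      intro rest hlen segs vias prev pp hpp
      match rest with
      | [] => simp [pvGoA, pvGrp, pvSegRunStep]
      | c :: rest' =>
        have hlen' : rest'.length ≤ n := by simp at hlen; omega
        by_cases hc : c.1 = prev.1
        · -- entry into the run: the sentinel comparison step never changes the state
          have hstep : pvGoA segs vias prev pp prev (c :: rest') =
              pvGoA segs vias prev (some prev) c rest' := by
            have hpd : pvPdOf pp prev = (999, 999) := by
              match pp with
              | none => rfl
              | some q =>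
                  have hq : ¬ prev.1 = q.1 := fun hh => hpp q rfl hh.symm
                  simp [pvPdOf, hq]
            have hcne : ¬ prev.1 ≠ c.1 := by simp [hc]
            simp only [pvGoA, if_neg hcne, hpd]
            by_cases hd : (c.2.1 - prev.2.1, c.2.2 - prev.2.2) = ((999 : Int), (999 : Int))
            · rw [if_neg (not_not_intro hd)]
            · rw [if_pos hd]
              simp
          rw [hstep]
          obtain ⟨hmem, hdec⟩ := pvGrp_decomp rest' c
          have hg : pvGrp prev (c :: rest') = (c :: (pvGrp c rest').1, (pvGrp c rest').2) := by
            simp [pvGrp, hc]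
          rcases hdec with ⟨h2, hxs⟩ | ⟨t0, t', hxs, ht0, h2⟩
          · -- the path ends inside this run
            have hend := pvGoA_run_end (pvGrp c rest').1 segs vias prev prev c hc hc.symm hmem
            rw [← hxs] at hend
            rw [hg, h2, ← hxs]
            simp only [List.foldl_cons, List.foldl_nil, pvSegRunStep, List.dropLast,
              List.map_nil, List.append_nil]
            exact hend
          · -- this run ends at a layer change towards t0
            have hcont := pvGoA_run_cont (pvGrp c rest').1 t0 t' segs vias prev prev c hc hc.symm
              hmem ht0
            rw [← hxs] at hcont
            rw [hcont]
            have hL := pvGrp_last_layer c rest'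
            have hlen'' : t'.length ≤ n := by
              have hx2 : rest'.length = (pvGrp c rest').1.length + (t0 :: t').length := by
                conv_lhs => rw [hxs]
                simp
              simp only [List.length_cons] at hx2
              omega
            rw [ih t' hlen'' _ _ t0 (some ((c :: (pvGrp c rest').1).getLastD (0, 0, 0)))
              (by intro q hq; cases hq; intro hh; exact ht0 (hh.symm.trans hL))]
            rw [hg, h2]
            simp only [Prod.mk.injEq]
            constructor
            · simp [pvSegRunStep]
            · simp only [List.dropLast_cons₂, List.map_cons, List.append_assoc,
                List.singleton_append]
              have hlc : pvLastCoords (prev :: c :: (pvGrp c rest').1) =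
                  (((c :: (pvGrp c rest').1).getLastD (0, 0, 0)).2.1,
                   ((c :: (pvGrp c rest').1).getLastD (0, 0, 0)).2.2) := by
                unfold pvLastCoords
                rw [List.getLastD_cons, pvGetLastD_irrel (pvGrp c rest').1 c prev (0, 0, 0)]
              rw [hlc]
        · -- a single-point run: layer change right away
          have hne : prev.1 ≠ c.1 := fun hh => hc hh.symm
          have hstep : pvGoA segs vias prev pp prev (c :: rest') =
              pvGoA segs (vias ++ [(prev.2.1, prev.2.2)]) c (some prev) c rest' := by
            simp [pvGoA, if_pos hne]
          rw [hstep]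
          rw [ih rest' hlen' segs (vias ++ [(prev.2.1, prev.2.2)]) c (some prev)
            (fun q hq => by cases hq; exact hne)]
          have hg : pvGrp prev (c :: rest') =
              ([], (c :: (pvGrp c rest').1) :: (pvGrp c rest').2) := by
            simp [pvGrp, hc]
          rw [hg]
          simp only [Prod.mk.injEq]
          constructor
          · simp [pvSegRunStep]
          · simp [pvLastCoords, List.dropLast_cons₂]

-- ===== VERDICT (by name: the statement is the Claim_ definition above) =====
theorem path_to_segments_spec : Claim_equal_path_to_segments := by
  intro path _
  unfold Spec_path_to_segments
  match path with
  | [] => rfl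
  | [_] => rfl
  | p0 :: p1 :: rest =>
    show pvGoA [] [] p0 none p0 (p1 :: rest) = _
    have hruns := pvFold_grp (p1 :: rest) [] [] p0
    simp only [List.nil_append] at hruns
    rw [pvGoA_grp (p1 :: rest).length (p1 :: rest) le_rfl [] [] p0 none (fun q hq => by cases hq)]
    have hlen2 : ¬ ((p0 :: p1 :: rest).length < 2) := by simp
    simp only [path_to_segments_alt, if_neg hlen2]
    rw [hruns]
    simp
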